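-- pv_equiv track=rewrite | github.com/psenzee/MuGen | src/Melody2Transform.py | _index_direction
-- ===== SOURCE A (Python) =====
-- def _index_direction(index, duration, direction):
--   if index == None or direction == 0:
--     return index
--   copy = []
--   for i in index.split(','):
--     if direction < 0:
--       i = i + '♭'
--     else:
--       i = i + '♯'
--     copy.append(i)
--   return ','.join(copy)
-- ===== SOURCE B (Python) =====
-- def _index_direction(index, duration, direction):
--   if index is None or direction == 0:
--     return index
--   symbol = '♭' if direction < 0 else '♯'
--   return index.replace(',', symbol + ',') + symbol
-- ===== Notes on version B (the rewrite author's own statement) =====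
-- stated objective: simpler
-- what changed: Replaces the split-on-comma / per-token loop / join pipeline with a single whole-string replace(',', symbol+',') plus one appended symbol.
import Mathlib
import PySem

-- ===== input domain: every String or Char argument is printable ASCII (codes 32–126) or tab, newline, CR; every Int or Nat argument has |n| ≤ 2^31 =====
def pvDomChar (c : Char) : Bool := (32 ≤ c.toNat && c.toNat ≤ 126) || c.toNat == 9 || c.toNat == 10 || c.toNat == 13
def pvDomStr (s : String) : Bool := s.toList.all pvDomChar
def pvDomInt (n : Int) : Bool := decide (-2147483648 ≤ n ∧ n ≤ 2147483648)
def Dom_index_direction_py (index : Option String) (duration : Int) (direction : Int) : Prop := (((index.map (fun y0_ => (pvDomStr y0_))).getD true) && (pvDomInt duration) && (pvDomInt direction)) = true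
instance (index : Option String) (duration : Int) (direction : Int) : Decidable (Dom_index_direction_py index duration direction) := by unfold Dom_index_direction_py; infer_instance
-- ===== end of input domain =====

-- B replaces A's split-on-comma / per-token loop / join pipeline by one whole-string replace plus an appended symbol (objective: simpler).

-- ===== PORT A =====
-- A: split on ',', append the symbol to each token in a loop, join with ','.
-- Ported over List Char (PySem.Chars is the exact code-point model of Python str).
def index_direction_py (index : Option String) (duration : Int) (direction : Int) : Option String :=
  match index with
  | none => none
  | some s =>
    if direction == 0 then some s
    else
      let copy : List (List Char) :=
        (PySem.Chars.splitOn s.toList [',']).foldl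
          (fun acc i => acc ++ [if direction < 0 then i ++ "♭".toList else i ++ "♯".toList]) []
      some (String.ofList (PySem.Chars.join [','] copy))

-- ===== PORT B =====
-- B: pick the symbol once, then index.replace(',', symbol + ',') + symbol.
def index_direction_py_alt (index : Option String) (duration : Int) (direction : Int) : Option String :=
  match index with
  | none => none
  | some s =>
    if direction == 0 then some s
    else
      let symbol : List Char := if direction < 0 then "♭".toList else "♯".toList
      some (String.ofList (PySem.Chars.replace s.toList [','] (symbol ++ [',']) ++ symbol))

-- ===== PRECONDITION & SPEC =====
def Spec_index_direction_py (index : Option String) (duration : Int) (direction : Int) (out : Option String) : Prop := out = index_direction_py_alt index duration direction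
instance (index : Option String) (duration : Int) (direction : Int) (out : Option String) : Decidable (Spec_index_direction_py index duration direction out) := by unfold Spec_index_direction_py; infer_instance

-- ===== CLAIM (what is proved, stated in full; the proofs are below) =====
def Claim_equal_index_direction_py : Prop := ∀ (index : Option String) (duration : Int) (direction : Int), Dom_index_direction_py index duration direction → Spec_index_direction_py index duration direction (index_direction_py index duration direction)

-- ===== LEMMAS AND PROOFS =====

-- Reference (fuel-free) form of split on a single comma; `pre` is the token being built.
def pvSplit (pre : List Char) : List Char → List (List Char)
  | [] => [pre]
  | c :: t => if c = ',' then pre :: pvSplit [] t else pvSplit (pre ++ [c]) t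

-- Reference (fuel-free) form of replacing each ',' by `new`.
def pvRepl (new : List Char) : List Char → List Char
  | [] => []
  | c :: t => if c = ',' then new ++ pvRepl new t else c :: pvRepl new t

theorem pvSplit_ne_nil (pre cs : List Char) : pvSplit pre cs ≠ [] := by
  cases cs with
  | nil => simp [pvSplit]
  | cons c t => simp only [pvSplit]; split <;> [simp; exact pvSplit_ne_nil _ t]

theorem splitOn_go_eq (fuel : Nat) (cs cur : List Char) (acc : List (List Char))
    (h : cs.length ≤ fuel) :
    PySem.Chars.splitOn.go [','] fuel cs cur acc = acc.reverse ++ pvSplit cur.reverse cs := by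
  induction fuel generalizing cs cur acc with
  | zero =>
    have : cs = [] := by cases cs <;> simp_all
    subst this; simp [PySem.Chars.splitOn.go, pvSplit]
  | succ f ih =>
    cases cs with
    | nil => simp [PySem.Chars.splitOn.go, pvSplit]
    | cons c t =>
      simp only [PySem.Chars.splitOn.go, List.isPrefixOf, List.isPrefixOf_nil_left, Bool.and_true]
      by_cases hc : c = ','
      · subst hc
        simp only [beq_self_eq_true, if_true]
        have hd : List.drop [','].length (',' :: t) = t := rfl
        rw [hd, ih t [] _ (by simpa using Nat.le_of_succ_le_succ (by simpa using h))]
        simp [pvSplit]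
      · have : (',' == c) = false := beq_eq_false_iff_ne.mpr (Ne.symm hc)
        simp only [this, Bool.false_eq_true, if_false]
        rw [ih t (c :: cur) acc (by simpa using Nat.le_of_succ_le_succ (by simpa using h))]
        simp [pvSplit, hc]

theorem replace_go_eq (new : List Char) (fuel : Nat) (cs acc : List Char)
    (h : cs.length ≤ fuel) :
    PySem.Chars.replace.go [','] new fuel cs acc = acc.reverse ++ pvRepl new cs := by
  induction fuel generalizing cs acc with
  | zero =>
    have : cs = [] := by cases cs <;> simp_all
    subst this; simp [PySem.Chars.replace.go, pvRepl]
  | succ f ih =>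
    cases cs with
    | nil => simp [PySem.Chars.replace.go, pvRepl]
    | cons c t =>
      simp only [PySem.Chars.replace.go, List.isPrefixOf, List.isPrefixOf_nil_left, Bool.and_true]
      by_cases hc : c = ','
      · subst hc
        simp only [beq_self_eq_true, if_true]
        have hd : List.drop [','].length (',' :: t) = t := rfl
        rw [hd, ih t _ (by simpa using Nat.le_of_succ_le_succ (by simpa using h))]
        simp [pvRepl]
      · have : (',' == c) = false := beq_eq_false_iff_ne.mpr (Ne.symm hc)
        simp only [this, Bool.false_eq_true, if_false]
        rw [ih t (c :: acc) (by simpa using Nat.le_of_succ_le_succ (by simpa using h))]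
        simp [pvRepl, hc]

theorem splitOn_eq (cs : List Char) :
    PySem.Chars.splitOn cs [','] = pvSplit [] cs := by
  unfold PySem.Chars.splitOn
  rw [splitOn_go_eq _ _ _ _ (Nat.le_succ _)]; simp

theorem replace_eq (new cs : List Char) :
    PySem.Chars.replace cs [','] new = pvRepl new cs := by
  unfold PySem.Chars.replace
  simp only [List.isEmpty_cons, Bool.false_eq_true, if_false]
  rw [replace_go_eq _ _ _ _ (Nat.le_refl _)]; simp

-- The heart: joining the symbol-suffixed tokens equals replace-then-append.
theorem join_map_eq (sym cs : List Char) (pre : List Char) :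
    PySem.Chars.join [','] ((pvSplit pre cs).map (· ++ sym)) =
      pre ++ pvRepl (sym ++ [',']) cs ++ sym := by
  induction cs generalizing pre with
  | nil => simp [pvSplit, pvRepl, PySem.Chars.join_singleton]
  | cons c t ih =>
    by_cases hc : c = ','
    · subst hc
      simp only [pvSplit, if_true, pvRepl, List.map_cons]
      obtain ⟨q, rest, hq⟩ : ∃ q rest, pvSplit ([] : List Char) t = q :: rest := by
        cases h : pvSplit ([] : List Char) t with
        | nil => exact absurd h (pvSplit_ne_nil _ _)
        | cons q rest => exact ⟨q, rest, rfl⟩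
      rw [hq]
      have hih := ih ([] : List Char)
      rw [hq] at hih
      simp only [List.map_cons] at hih
      simp only [List.map_cons, PySem.Chars.join_cons_cons]
      rw [hih]
      simp
    · simp only [pvSplit, pvRepl, hc, if_false]
      rw [ih (pre ++ [c])]
      simp

theorem main_eq (sym cs : List Char) :
    PySem.Chars.join [','] ((PySem.Chars.splitOn cs [',']).foldl
        (fun acc i => acc ++ [i ++ sym]) []) =
      PySem.Chars.replace cs [','] (sym ++ [',']) ++ sym := by
  rw [PySem.List.foldl_append_singleton_eq_map, splitOn_eq, replace_eq]
  simpa using join_map_eq sym cs []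

-- ===== VERDICT (by name: the statement is the Claim_ definition above) =====
theorem index_direction_py_spec : Claim_equal_index_direction_py := by
  intro index duration direction _
  unfold Spec_index_direction_py index_direction_py index_direction_py_alt
  cases index with
  | none => rfl
  | some s =>
    simp only
    by_cases h0 : direction == 0
    · simp [h0]
    · simp only [h0, Bool.false_eq_true, if_false, Option.some.injEq]
      by_cases hneg : direction < 0
      · simp only [hneg, if_true]
        rw [main_eq]
      · simp only [hneg, if_false]
        rw [main_eq]
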